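-- pv_equiv track=rewrite | github.com/syjoy1993/python_2024 | day15/1_review_more.py | solution
-- ===== SOURCE A (Python) =====
-- def solution(phone_number):
--     masking_num = ""
--     for index,i in enumerate(phone_number):
--         if index > 0:
--             masking_num += i
--         else:
--             masking_num += '*'
--
--     return masking_num
-- ===== SOURCE B (Python) =====
-- def solution(phone_number):
--     if not phone_number:
--         return phone_number
--     return '*' + phone_number[1:]
-- ===== Notes on version B (the rewrite author's own statement) =====
-- stated objective: simpler
-- what changed: Replaced the character-by-character enumerate loop with string concatenation by a single closed-form expression: an asterisk prepended to the tail slice of the input (empty input returned unchanged).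
import Mathlib
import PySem

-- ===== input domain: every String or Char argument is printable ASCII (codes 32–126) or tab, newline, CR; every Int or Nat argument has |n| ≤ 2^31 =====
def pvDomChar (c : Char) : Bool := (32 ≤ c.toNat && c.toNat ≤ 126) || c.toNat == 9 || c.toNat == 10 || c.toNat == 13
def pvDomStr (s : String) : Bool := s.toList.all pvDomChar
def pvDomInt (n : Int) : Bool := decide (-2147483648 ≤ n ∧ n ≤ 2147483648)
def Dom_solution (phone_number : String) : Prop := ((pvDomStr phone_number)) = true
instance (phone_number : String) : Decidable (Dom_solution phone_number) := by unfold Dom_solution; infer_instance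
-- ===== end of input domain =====

-- B replaces A's enumerate loop by the closed-form '*' + phone_number[1:] (simpler).

-- ===== PORT A =====
def solution (phone_number : String) : String :=
  String.ofList ((PySem.List.enumerate phone_number.toList).foldl
    (fun masking_num p => if p.1 > 0 then masking_num ++ [p.2] else masking_num ++ ['*']) [])

-- ===== PORT B =====
def solution_alt (phone_number : String) : String :=
  if phone_number.toList.isEmpty then phone_number
  else String.ofList ('*' :: PySem.List.slice phone_number.toList (some 1) none)

-- ===== PRECONDITION & SPEC =====
def Spec_solution (phone_number : String) (out : String) : Prop := out = solution_alt phone_number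
instance (phone_number : String) (out : String) : Decidable (Spec_solution phone_number out) := by unfold Spec_solution; infer_instance

-- ===== CLAIM (what is proved, stated in full; the proofs are below) =====
def Claim_equal_solution : Prop := ∀ (phone_number : String), Dom_solution phone_number → Spec_solution phone_number (solution phone_number)

-- ===== LEMMAS AND PROOFS =====
lemma solution_loop_tail (cs : List Char) (s : Int) (hs : 1 ≤ s) (acc : List Char) :
    (PySem.List.enumerate cs s).foldl
      (fun masking_num p => if p.1 > 0 then masking_num ++ [p.2] else masking_num ++ ['*']) acc
      = acc ++ cs := by
  induction cs generalizing s acc with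
  | nil => simp [PySem.List.enumerate_nil]
  | cons c cs ih =>
      rw [PySem.List.enumerate_cons]
      simp only [List.foldl_cons]
      rw [if_pos (by omega)]
      rw [ih (s + 1) (by omega)]
      simp

-- ===== VERDICT (by name: the statement is the Claim_ definition above) =====
theorem solution_spec : Claim_equal_solution := by
  intro pn _
  unfold Spec_solution solution solution_alt
  cases h : pn.toList with
  | nil =>
      simp only [List.isEmpty_nil, if_true, PySem.List.enumerate_nil, List.foldl_nil]
      rw [← h, String.ofList_toList]
  | cons c cs =>
      simp only [List.isEmpty_cons, if_neg Bool.false_ne_true]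
      rw [PySem.List.enumerate_cons]
      simp only [List.foldl_cons, if_neg (by omega : ¬ ((0:Int) > 0))]
      rw [solution_loop_tail cs (0+1) (by omega)]
      rw [PySem.List.slice_from_one]
      rfl
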